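-- pv_equiv track=rewrite | github.com/p8queen/uade-progra1 | clase-1-listas-1.py | combinar
-- ===== SOURCE A (Python) =====
-- def combinar(list1, list2):
--     if len(list1) != len(list2):
--         return "Las listas tienen diferentes tamaños"
--     else:
--         resultado = []
--         for i in range(len(list1)):
--             resultado.append(list1[i])
--             resultado.append(list2[i])
--         return resultado
-- ===== SOURCE B (Python) =====
-- def combinar(list1, list2):
--     if len(list1) != len(list2):
--         return "Las listas tienen diferentes tamaños"
--     resultado = [None] * (2 * len(list1))
--     resultado[0::2] = list1
--     resultado[1::2] = list2
--     return resultado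
-- ===== Notes on version B (the rewrite author's own statement) =====
-- stated objective: alternative
-- what changed: Instead of appending element pairs in an index loop, B preallocates the whole output once and fills even and odd positions with two strided slice assignments (two staged passes, no append accumulator).
import Mathlib
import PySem

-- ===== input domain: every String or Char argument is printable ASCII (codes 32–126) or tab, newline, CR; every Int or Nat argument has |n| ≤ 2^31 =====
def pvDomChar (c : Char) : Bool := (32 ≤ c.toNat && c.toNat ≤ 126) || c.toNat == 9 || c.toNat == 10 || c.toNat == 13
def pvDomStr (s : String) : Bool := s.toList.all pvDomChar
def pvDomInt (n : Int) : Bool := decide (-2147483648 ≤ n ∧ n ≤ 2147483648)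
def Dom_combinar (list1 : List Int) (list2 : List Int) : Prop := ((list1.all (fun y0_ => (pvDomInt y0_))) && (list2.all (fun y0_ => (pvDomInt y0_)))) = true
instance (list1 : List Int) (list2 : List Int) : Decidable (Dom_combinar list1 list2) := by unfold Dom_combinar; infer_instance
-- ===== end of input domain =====

-- B preallocates the output and fills even/odd positions by strided slice assignment
-- instead of A's per-index append loop (alternative decomposition; return value only).

-- ===== PORT A =====
def combinar (list1 : List Int) (list2 : List Int) : List Int :=
  (PySem.List.pyRange 0 (list1.length : Int) 1).foldl
    (fun resultado i =>
      (resultado ++ [PySem.List.pyGetD list1 i 0]) ++ [PySem.List.pyGetD list2 i 0]) []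

-- ===== PORT B =====
-- resultado[start::2] = vals : write vals at positions start, start+2, start+4, …
def strideSet2 (res : List Int) (start : Nat) (vals : List Int) : List Int :=
  match vals with
  | [] => res
  | v :: vs => strideSet2 (res.set start v) (start + 2) vs

def combinar_alt (list1 : List Int) (list2 : List Int) : List Int :=
  -- resultado = [None] * (2*len(list1)); placeholder 0 (every cell is overwritten)
  let resultado := List.replicate (2 * list1.length) (0 : Int)
  let resultado := strideSet2 resultado 0 list1   -- resultado[0::2] = list1
  let resultado := strideSet2 resultado 1 list2   -- resultado[1::2] = list2
  resultado

-- ===== PRECONDITION & SPEC =====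
-- Pre_ excludes unequal lengths, where Python A returns the string
-- "Las listas tienen diferentes tamaños" instead of a list of ints.
def Pre_combinar (list1 : List Int) (list2 : List Int) : Prop := list1.length = list2.length
instance (list1 : List Int) (list2 : List Int) : Decidable (Pre_combinar list1 list2) := by unfold Pre_combinar; infer_instance
def pvWitness_combinar : List Int × List Int := ([1, 2], [3, 4])

def Spec_combinar (list1 : List Int) (list2 : List Int) (out : List Int) : Prop := out = combinar_alt list1 list2
instance (list1 : List Int) (list2 : List Int) (out : List Int) : Decidable (Spec_combinar list1 list2 out) := by unfold Spec_combinar; infer_instance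

-- ===== CLAIM (what is proved, stated in full; the proofs are below) =====
def Claim_equal_combinar : Prop := ∀ (list1 : List Int) (list2 : List Int), Dom_combinar list1 list2 → Pre_combinar list1 list2 → Spec_combinar list1 list2 (combinar list1 list2)

-- ===== LEMMAS AND PROOFS =====

-- shifting strideSet2 past two untouched cells
theorem strideSet2_shift (vals : List Int) (x y : Int) (rest : List Int) (k : Nat) :
    strideSet2 (x :: y :: rest) (k + 2) vals = x :: y :: strideSet2 rest k vals := by
  induction vals generalizing x y rest k with
  | nil => simp [strideSet2]
  | cons v vs ih =>
    simp only [strideSet2, List.set]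
    rw [show k + 2 + 2 = (k + 2) + 2 from rfl, ih]

-- the two strided writes over a fresh buffer produce the interleaving
theorem strideSet2_interleave (a : List Int) :
    ∀ (b : List Int), a.length = b.length →
    strideSet2 (strideSet2 (List.replicate (2 * a.length) (0 : Int)) 0 a) 1 b =
      (a.zip b).flatMap (fun par => [par.1, par.2]) := by
  induction a with
  | nil => intro b h; cases b with
    | nil => simp [strideSet2]
    | cons _ _ => simp at h
  | cons v vs ih =>
    intro b h
    cases b with
    | nil => simp at h
    | cons w ws =>
      have h' : vs.length = ws.length := by simpa using h
      have hrep : 2 * (v :: vs).length = (2 * vs.length) + 1 + 1 := by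
        simp [List.length_cons]; ring
      rw [hrep, List.replicate_succ, List.replicate_succ]
      simp only [strideSet2, List.set]
      rw [show (0 : Nat) + 2 = 0 + 2 from rfl, strideSet2_shift]
      simp only [List.set]
      rw [show (1 : Nat) + 2 = 1 + 2 from rfl, strideSet2_shift]
      simp only [List.zip_cons_cons, List.flatMap_cons]
      rw [ih ws h']
      rfl

-- A's range/append loop produces the interleaving too
theorem interleave_range_eq_zip (list1 list2 : List Int) (h : list1.length = list2.length) :
    (List.range list1.length).flatMap (fun k => [list1.getD k 0, list2.getD k 0]) =
      (list1.zip list2).flatMap (fun par => [par.1, par.2]) := by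
  induction list1 generalizing list2 with
  | nil => simp
  | cons x xs ih =>
    cases list2 with
    | nil => simp at h
    | cons y ys =>
      simp only [List.length_cons, List.range_succ_eq_map, List.flatMap_cons, List.flatMap_map]
      simp only [List.getD_cons_zero, List.getD_cons_succ, List.zip_cons_cons, List.flatMap_cons]
      congr 1
      exact ih ys (by simpa using h)

-- ===== VERDICT (by name: the statement is the Claim_ definition above) =====
theorem combinar_spec : Claim_equal_combinar := by
  intro list1 list2 _ hpre
  unfold Spec_combinar combinar combinar_alt
  simp only [List.append_assoc]
  rw [PySem.List.foldl_append_eq_flatMap (g := fun i =>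
        [PySem.List.pyGetD list1 i 0] ++ [PySem.List.pyGetD list2 i 0])]
  · simp only [List.nil_append, PySem.List.pyRange_one, Int.sub_zero, List.flatMap_map,
      Int.zero_add, List.singleton_append]
    have : ∀ k : Nat, ([PySem.List.pyGetD list1 (k : Int) 0, PySem.List.pyGetD list2 (k : Int) 0] : List Int)
        = [list1.getD k 0, list2.getD k 0] := by
      intro k; simp [PySem.List.pyGetD_natCast]
    calc (List.range (list1.length : Int).toNat).flatMap
            (fun k : Nat => [PySem.List.pyGetD list1 (k : Int) 0, PySem.List.pyGetD list2 (k : Int) 0])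
        = (List.range list1.length).flatMap (fun k => [list1.getD k 0, list2.getD k 0]) := by
          simp only [Int.toNat_natCast]
          exact List.flatMap_congr (fun k _ => this k)
      _ = (list1.zip list2).flatMap (fun par => [par.1, par.2]) := interleave_range_eq_zip list1 list2 hpre
      _ = _ := (strideSet2_interleave list1 list2 hpre).symm
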